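-- pv_equiv track=rewrite | github.com/cybercortex-robotics/dojo | inference/generate_configuration.py | group_model_names
-- ===== SOURCE A (Python) =====
-- def group_model_names(output_tensor_names):
--     groups = dict()
--     groups["yolov3_tiny"] = list()
--     groups["yolov3"] = list()
--     groups["lanenet"] = list()
--     groups["unet"] = list()
--     groups["box_estimation"] = list()
--
--     for o in output_tensor_names:
--         if "yolov3_tiny" in o:
--             groups["yolov3_tiny"].append((o, output_tensor_names[o]))
--         elif "yolov3" in o:
--             groups["yolov3"].append((o, output_tensor_names[o]))
--         elif "lanenet" in o:
--             groups["lanenet"].append((o, output_tensor_names[o]))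
--         elif "unet" in o:
--             groups["unet"].append((o, output_tensor_names[o]))
--         elif "model_1" in o:
--             groups["box_estimation"].append((o, output_tensor_names[o]))
--         elif "box_estimation" in o:
--             groups["box_estimation"].append((o, output_tensor_names[o]))
--         else:
--             raise NotImplementedError("Unknown Head")
--     return groups
-- ===== SOURCE B (Python) =====
-- _PATTERNS = [
--     ("yolov3_tiny", "yolov3_tiny"),
--     ("yolov3", "yolov3"),
--     ("lanenet", "lanenet"),
--     ("unet", "unet"),
--     ("model_1", "box_estimation"),
--     ("box_estimation", "box_estimation"),
-- ]
-- _GROUPS = ["yolov3_tiny", "yolov3", "lanenet", "unet", "box_estimation"]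
--
--
-- def _classify(name):
--     for sub, grp in _PATTERNS:
--         if sub in name:
--             return grp
--     raise NotImplementedError("Unknown Head")
--
--
-- def group_model_names(output_tensor_names):
--     labelled = [(_classify(o), o, v) for o, v in output_tensor_names.items()]
--     return {g: [(o, v) for lbl, o, v in labelled if lbl == g] for g in _GROUPS}
-- ===== Notes on version B (the rewrite author's own statement) =====
-- stated objective: simpler
-- what changed: Replaces the six-way elif chain with appends into a mutated dict by a data-driven ordered pattern table: each key is labelled once by a first-match classify helper, and the result dict is built declaratively with one comprehension per group.
import Mathlib
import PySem

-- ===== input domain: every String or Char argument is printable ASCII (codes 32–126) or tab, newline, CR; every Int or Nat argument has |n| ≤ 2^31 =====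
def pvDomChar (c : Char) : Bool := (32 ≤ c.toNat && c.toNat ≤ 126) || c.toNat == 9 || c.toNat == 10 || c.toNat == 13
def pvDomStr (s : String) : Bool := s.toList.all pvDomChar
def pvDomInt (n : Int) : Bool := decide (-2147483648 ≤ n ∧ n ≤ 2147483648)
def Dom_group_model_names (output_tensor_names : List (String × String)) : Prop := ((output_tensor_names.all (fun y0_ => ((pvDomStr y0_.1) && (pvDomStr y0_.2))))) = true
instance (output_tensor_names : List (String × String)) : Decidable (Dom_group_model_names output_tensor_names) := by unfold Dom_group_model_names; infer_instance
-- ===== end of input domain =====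

-- B replaces the elif chain mutating a dict by a data-driven pattern table: label every key once, then build each group by one comprehension (objective: simpler).
-- The dict argument is the association list of its items; iterating its keys and looking each key up yields exactly the item pairs (keys of a dict are distinct, see Pre_).

-- ===== PORT A =====
def group_model_names (output_tensor_names : List (String × String)) : List (String × List (String × String)) :=
  let groups : PySem.Dict String (List (String × String)) :=
    PySem.Dict.mk [("yolov3_tiny", []), ("yolov3", []), ("lanenet", []), ("unet", []), ("box_estimation", [])]
  (output_tensor_names.foldl (fun groups p =>
    -- for o in output_tensor_names: o = p.1, output_tensor_names[o] = p.2 (dict keys are distinct)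
    if PySem.Str.isIn "yolov3_tiny" p.1 then PySem.Dict.modify groups "yolov3_tiny" [] (· ++ [(p.1, p.2)])
    else if PySem.Str.isIn "yolov3" p.1 then PySem.Dict.modify groups "yolov3" [] (· ++ [(p.1, p.2)])
    else if PySem.Str.isIn "lanenet" p.1 then PySem.Dict.modify groups "lanenet" [] (· ++ [(p.1, p.2)])
    else if PySem.Str.isIn "unet" p.1 then PySem.Dict.modify groups "unet" [] (· ++ [(p.1, p.2)])
    else if PySem.Str.isIn "model_1" p.1 then PySem.Dict.modify groups "box_estimation" [] (· ++ [(p.1, p.2)])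
    else if PySem.Str.isIn "box_estimation" p.1 then PySem.Dict.modify groups "box_estimation" [] (· ++ [(p.1, p.2)])
    else groups  -- raise NotImplementedError("Unknown Head"): excluded by Pre_
  ) groups).items

-- ===== PORT B =====
def pvPatterns : List (String × String) :=
  [("yolov3_tiny", "yolov3_tiny"), ("yolov3", "yolov3"), ("lanenet", "lanenet"),
   ("unet", "unet"), ("model_1", "box_estimation"), ("box_estimation", "box_estimation")]

def pvGroupNames : List String := ["yolov3_tiny", "yolov3", "lanenet", "unet", "box_estimation"]

-- _classify: first pattern whose substring occurs; none = raise NotImplementedError (excluded by Pre_)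
def pvClassify (name : String) : Option String :=
  (pvPatterns.find? (fun sg => PySem.Str.isIn sg.1 name)).map Prod.snd

def group_model_names_alt (output_tensor_names : List (String × String)) : List (String × List (String × String)) :=
  let labelled := output_tensor_names.map (fun p => (pvClassify p.1, p.1, p.2))
  pvGroupNames.map (fun g => (g, (labelled.filter (fun t => t.1 == some g)).map (fun t => (t.2.1, t.2.2))))

-- ===== PRECONDITION & SPEC =====
-- Pre_ excludes inputs with a key matching no pattern (Python A raises NotImplementedError there) and
-- association lists with duplicate keys (a Python dict cannot contain them; the list form is an artefact of the encoding).
def Pre_group_model_names (output_tensor_names : List (String × String)) : Prop :=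
  (output_tensor_names.map Prod.fst).Nodup ∧
  ∀ p ∈ output_tensor_names,
    (PySem.Str.isIn "yolov3_tiny" p.1 || PySem.Str.isIn "yolov3" p.1 || PySem.Str.isIn "lanenet" p.1 ||
     PySem.Str.isIn "unet" p.1 || PySem.Str.isIn "model_1" p.1 || PySem.Str.isIn "box_estimation" p.1) = true
instance (output_tensor_names : List (String × String)) : Decidable (Pre_group_model_names output_tensor_names) := by
  unfold Pre_group_model_names; infer_instance

def pvWitness_group_model_names : (List (String × String)) := [("yolov3/out", "conv2d"), ("my_unet", "u")]

def Spec_group_model_names (output_tensor_names : List (String × String)) (out : List (String × List (String × String))) : Prop := out = group_model_names_alt output_tensor_names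
instance (output_tensor_names : List (String × String)) (out : List (String × List (String × String))) : Decidable (Spec_group_model_names output_tensor_names out) := by unfold Spec_group_model_names; infer_instance

-- ===== CLAIM (what is proved, stated in full; the proofs are below) =====
def Claim_equal_group_model_names : Prop := ∀ (output_tensor_names : List (String × String)), Dom_group_model_names output_tensor_names → Pre_group_model_names output_tensor_names → Spec_group_model_names output_tensor_names (group_model_names output_tensor_names)

-- ===== LEMMAS AND PROOFS =====

-- B's per-group list, as a function of the input list
def pvSel (g : String) (l : List (String × String)) : List (String × String) :=
  ((l.map (fun p => (pvClassify p.1, p.1, p.2))).filter (fun t => t.1 == some g)).map (fun t => (t.2.1, t.2.2))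

lemma pvSel_nil (g : String) : pvSel g [] = [] := rfl

lemma pvSel_cons (g : String) (p : String × String) (l : List (String × String)) :
    pvSel g (p :: l) =
      (if pvClassify p.1 == some g then [(p.1, p.2)] else []) ++ pvSel g l := by
  simp only [pvSel, List.map_cons, List.filter_cons]
  by_cases h : pvClassify p.1 = some g
  · simp [h]
  · simp [h]

lemma pvMod_yolov3_tiny (a b c d e w : List (String × String)) :
    PySem.Dict.modify (PySem.Dict.mk [("yolov3_tiny", a), ("yolov3", b), ("lanenet", c), ("unet", d), ("box_estimation", e)]) "yolov3_tiny" [] (· ++ w) =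
    PySem.Dict.mk [("yolov3_tiny", a ++ w), ("yolov3", b), ("lanenet", c), ("unet", d), ("box_estimation", e)] := by
  simp [PySem.Dict.modify, PySem.Dict.insert, PySem.Dict.getD, PySem.Dict.get?, PySem.Dict.contains]

lemma pvMod_yolov3 (a b c d e w : List (String × String)) :
    PySem.Dict.modify (PySem.Dict.mk [("yolov3_tiny", a), ("yolov3", b), ("lanenet", c), ("unet", d), ("box_estimation", e)]) "yolov3" [] (· ++ w) =
    PySem.Dict.mk [("yolov3_tiny", a), ("yolov3", b ++ w), ("lanenet", c), ("unet", d), ("box_estimation", e)] := by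
  simp [PySem.Dict.modify, PySem.Dict.insert, PySem.Dict.getD, PySem.Dict.get?, PySem.Dict.contains]

lemma pvMod_lanenet (a b c d e w : List (String × String)) :
    PySem.Dict.modify (PySem.Dict.mk [("yolov3_tiny", a), ("yolov3", b), ("lanenet", c), ("unet", d), ("box_estimation", e)]) "lanenet" [] (· ++ w) =
    PySem.Dict.mk [("yolov3_tiny", a), ("yolov3", b), ("lanenet", c ++ w), ("unet", d), ("box_estimation", e)] := by
  simp [PySem.Dict.modify, PySem.Dict.insert, PySem.Dict.getD, PySem.Dict.get?, PySem.Dict.contains]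

lemma pvMod_unet (a b c d e w : List (String × String)) :
    PySem.Dict.modify (PySem.Dict.mk [("yolov3_tiny", a), ("yolov3", b), ("lanenet", c), ("unet", d), ("box_estimation", e)]) "unet" [] (· ++ w) =
    PySem.Dict.mk [("yolov3_tiny", a), ("yolov3", b), ("lanenet", c), ("unet", d ++ w), ("box_estimation", e)] := by
  simp [PySem.Dict.modify, PySem.Dict.insert, PySem.Dict.getD, PySem.Dict.get?, PySem.Dict.contains]

lemma pvMod_box_estimation (a b c d e w : List (String × String)) :
    PySem.Dict.modify (PySem.Dict.mk [("yolov3_tiny", a), ("yolov3", b), ("lanenet", c), ("unet", d), ("box_estimation", e)]) "box_estimation" [] (· ++ w) =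
    PySem.Dict.mk [("yolov3_tiny", a), ("yolov3", b), ("lanenet", c), ("unet", d), ("box_estimation", e ++ w)] := by
  simp [PySem.Dict.modify, PySem.Dict.insert, PySem.Dict.getD, PySem.Dict.get?, PySem.Dict.contains]

set_option maxHeartbeats 2000000 in
lemma pv_loop (l : List (String × String)) (a b c d e : List (String × String)) :
    l.foldl (fun groups p =>
      if PySem.Str.isIn "yolov3_tiny" p.1 then PySem.Dict.modify groups "yolov3_tiny" [] (· ++ [(p.1, p.2)])
      else if PySem.Str.isIn "yolov3" p.1 then PySem.Dict.modify groups "yolov3" [] (· ++ [(p.1, p.2)])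
      else if PySem.Str.isIn "lanenet" p.1 then PySem.Dict.modify groups "lanenet" [] (· ++ [(p.1, p.2)])
      else if PySem.Str.isIn "unet" p.1 then PySem.Dict.modify groups "unet" [] (· ++ [(p.1, p.2)])
      else if PySem.Str.isIn "model_1" p.1 then PySem.Dict.modify groups "box_estimation" [] (· ++ [(p.1, p.2)])
      else if PySem.Str.isIn "box_estimation" p.1 then PySem.Dict.modify groups "box_estimation" [] (· ++ [(p.1, p.2)])
      else groups)
      (PySem.Dict.mk [("yolov3_tiny", a), ("yolov3", b), ("lanenet", c), ("unet", d), ("box_estimation", e)]) =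
    PySem.Dict.mk
    [("yolov3_tiny", a ++ pvSel "yolov3_tiny" l), ("yolov3", b ++ pvSel "yolov3" l),
     ("lanenet", c ++ pvSel "lanenet" l), ("unet", d ++ pvSel "unet" l),
     ("box_estimation", e ++ pvSel "box_estimation" l)] := by
  induction l generalizing a b c d e with
  | nil => simp [pvSel_nil]
  | cons p t ih =>
    have hcl : pvClassify p.1 =
        (if PySem.Str.isIn "yolov3_tiny" p.1 then some "yolov3_tiny"
         else if PySem.Str.isIn "yolov3" p.1 then some "yolov3"
         else if PySem.Str.isIn "lanenet" p.1 then some "lanenet"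
         else if PySem.Str.isIn "unet" p.1 then some "unet"
         else if PySem.Str.isIn "model_1" p.1 then some "box_estimation"
         else if PySem.Str.isIn "box_estimation" p.1 then some "box_estimation"
         else none) := by
      simp only [pvClassify, pvPatterns, List.find?]
      split_ifs <;> simp_all
    simp only [List.foldl_cons]
    split_ifs with h1 h2 h3 h4 h5 h6
    · have hc : pvClassify p.1 = some "yolov3_tiny" := by rw [hcl, if_pos h1]
      rw [pvMod_yolov3_tiny, ih]; simp [pvSel_cons, hc]
    · have hc : pvClassify p.1 = some "yolov3" := by rw [hcl, if_neg h1, if_pos h2]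
      rw [pvMod_yolov3, ih]; simp [pvSel_cons, hc]
    · have hc : pvClassify p.1 = some "lanenet" := by rw [hcl, if_neg h1, if_neg h2, if_pos h3]
      rw [pvMod_lanenet, ih]; simp [pvSel_cons, hc]
    · have hc : pvClassify p.1 = some "unet" := by rw [hcl, if_neg h1, if_neg h2, if_neg h3, if_pos h4]
      rw [pvMod_unet, ih]; simp [pvSel_cons, hc]
    · have hc : pvClassify p.1 = some "box_estimation" := by
        rw [hcl, if_neg h1, if_neg h2, if_neg h3, if_neg h4, if_pos h5]
      rw [pvMod_box_estimation, ih]; simp [pvSel_cons, hc]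
    · have hc : pvClassify p.1 = some "box_estimation" := by
        rw [hcl, if_neg h1, if_neg h2, if_neg h3, if_neg h4, if_neg h5, if_pos h6]
      rw [pvMod_box_estimation, ih]; simp [pvSel_cons, hc]
    · have hc : pvClassify p.1 = none := by
        rw [hcl, if_neg h1, if_neg h2, if_neg h3, if_neg h4, if_neg h5, if_neg h6]
      rw [ih]; simp [pvSel_cons, hc]

theorem pv_main (l : List (String × String)) :
    group_model_names l = group_model_names_alt l := by
  simp only [group_model_names, group_model_names_alt]
  rw [pv_loop]
  simp [pvGroupNames, pvSel]

-- ===== VERDICT (by name: the statement is the Claim_ definition above) =====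
theorem group_model_names_spec : Claim_equal_group_model_names := by
  intro l _ _
  exact pv_main l
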